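-- pv_equiv track=rewrite | github.com/luyanez/SoftwareEngineerInterviewCode | Code/Array_Strings/Prefix_sum/minimum_start_value.py | minimum_start_value
-- ===== SOURCE A (Python) =====
-- def minimum_start_value(nums):
--     startValue = 1
--     while True:
--         total = startValue
--         isValid = True
--
--         for num in nums:
--
--             total += num
--             if total < 1:
--                 isValid = False
--                 break
--
--         if isValid:
--             return startValue
--         else:
--             startValue += 1
-- ===== SOURCE B (Python) =====
-- def minimum_start_value(nums):
--     cur = 0
--     mn = 0
--     for num in nums:
--         cur += num
--         if cur < mn:
--             mn = cur
--     return 1 - mn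
-- ===== Notes on version B (the rewrite author's own statement) =====
-- stated objective: faster
-- what changed: Replaced the retry loop (try startValue = 1,2,3,... and rescan the whole list each time) by a single pass that tracks the minimum prefix sum and returns 1 - min(0, minPrefix).
import Mathlib
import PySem

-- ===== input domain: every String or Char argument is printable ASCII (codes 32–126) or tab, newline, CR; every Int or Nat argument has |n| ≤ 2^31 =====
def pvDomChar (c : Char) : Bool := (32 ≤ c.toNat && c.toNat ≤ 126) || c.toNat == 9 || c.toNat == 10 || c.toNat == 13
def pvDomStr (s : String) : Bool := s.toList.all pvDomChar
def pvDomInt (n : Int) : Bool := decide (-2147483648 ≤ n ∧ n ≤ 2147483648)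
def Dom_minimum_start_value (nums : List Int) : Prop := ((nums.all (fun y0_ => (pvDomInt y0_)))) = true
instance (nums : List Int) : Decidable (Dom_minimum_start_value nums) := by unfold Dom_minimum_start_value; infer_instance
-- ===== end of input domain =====

-- B replaces A's retry loop (re-scan for each candidate start value) by one pass tracking
-- the minimum prefix sum; answer = 1 - min(0, minPrefix).  Objective: faster (asymptotic).


-- ===== PORT A =====
-- min(0, minimum nonempty-prefix sum): used ONLY as a termination measure for A's while-loop
def pvMinPrefix : List Int → Int
  | [] => 0
  | n :: rest => min 0 (n + pvMinPrefix rest)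

-- inner `for num in nums` loop with the `break`: returns isValid
def pvCheck (total : Int) : List Int → Bool
  | [] => true
  | n :: rest =>
    let t := total + n
    if t < 1 then false else pvCheck t rest

theorem pvMinPrefix_nonpos : ∀ (l : List Int), pvMinPrefix l ≤ 0
  | [] => le_refl 0
  | _ :: rest => by simp [pvMinPrefix]

-- one direction of the loop characterisation, needed for the termination of the while-loop
theorem pvCheck_of_le : ∀ (l : List Int) (t : Int), 1 ≤ t + pvMinPrefix l → pvCheck t l = true
  | [], _, _ => rfl
  | n :: rest, t, h => by
    have hp := pvMinPrefix_nonpos rest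
    simp only [pvMinPrefix] at h
    have h1 : 1 ≤ t + (n + pvMinPrefix rest) := by
      rcases le_min_iff.mp (by omega : 1 - t ≤ min 0 (n + pvMinPrefix rest)) with ⟨_, h2⟩
      omega
    simp only [pvCheck]
    have htn : ¬ (t + n < 1) := by omega
    simp only [htn, if_false]
    exact pvCheck_of_le rest (t + n) (by omega)

-- the `while True` loop of A
def pvOuter (nums : List Int) (startValue : Int) : Int :=
  if pvCheck startValue nums then startValue else pvOuter nums (startValue + 1)
termination_by (1 - pvMinPrefix nums - startValue).toNat
decreasing_by
  rename_i h
  have : ¬ (1 ≤ startValue + pvMinPrefix nums) := fun hc => h (pvCheck_of_le nums startValue hc)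
  omega

def minimum_start_value (nums : List Int) : Int := pvOuter nums 1

-- ===== PORT B =====
def minimum_start_value_alt (nums : List Int) : Int :=
  1 - (nums.foldl (fun (st : Int × Int) n =>
    let c := st.1 + n
    (c, if c < st.2 then c else st.2)) (0, 0)).2

-- ===== PRECONDITION & SPEC =====
def Spec_minimum_start_value (nums : List Int) (out : Int) : Prop := out = minimum_start_value_alt nums
instance (nums : List Int) (out : Int) : Decidable (Spec_minimum_start_value nums out) := by unfold Spec_minimum_start_value; infer_instance

-- ===== CLAIM (what is proved, stated in full; the proofs are below) =====
def Claim_equal_minimum_start_value : Prop := ∀ (nums : List Int), Dom_minimum_start_value nums → Spec_minimum_start_value nums (minimum_start_value nums)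

-- ===== LEMMAS AND PROOFS =====

-- full characterisation of the inner loop for start values ≥ 1
theorem pvCheck_iff : ∀ (l : List Int) (t : Int), 1 ≤ t →
    (pvCheck t l = true ↔ 1 ≤ t + pvMinPrefix l)
  | [], t, ht => by simp [pvCheck, pvMinPrefix, ht]
  | n :: rest, t, ht => by
    constructor
    · intro h
      simp only [pvCheck] at h
      by_cases hlt : t + n < 1
      · simp [hlt] at h
      · simp only [hlt, if_false] at h
        have := (pvCheck_iff rest (t + n) (by omega)).mp h
        simp only [pvMinPrefix]
        have : 1 ≤ t + (n + pvMinPrefix rest) := by omega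
        omega
    · exact pvCheck_of_le (n :: rest) t

-- B's fold computes min mn (c + pvMinPrefix l) given the invariant mn ≤ c
theorem foldl_minPrefix : ∀ (l : List Int) (c mn : Int), mn ≤ c →
    (l.foldl (fun (st : Int × Int) n =>
      let c := st.1 + n
      (c, if c < st.2 then c else st.2)) (c, mn)).2 = min mn (c + pvMinPrefix l)
  | [], c, mn, h => by simp [pvMinPrefix]; omega
  | n :: rest, c, mn, h => by
    simp only [List.foldl_cons]
    have hrec := foldl_minPrefix rest (c + n) (if c + n < mn then c + n else mn)
      (by split <;> omega)
    simp only [hrec, pvMinPrefix]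
    have := pvMinPrefix_nonpos rest
    rcases le_or_gt (c + n) mn with h1 | h1 <;> rcases le_or_gt (pvMinPrefix rest) 0 with h2 | h2 <;>
      simp only [min_def] <;> split_ifs <;> omega

theorem alt_eq (nums : List Int) : minimum_start_value_alt nums = 1 - pvMinPrefix nums := by
  unfold minimum_start_value_alt
  rw [foldl_minPrefix nums 0 0 (le_refl 0)]
  have := pvMinPrefix_nonpos nums
  simp only [zero_add, min_eq_right this]

theorem outer_eq (nums : List Int) (s : Int) (h1 : 1 ≤ s) (h2 : s ≤ 1 - pvMinPrefix nums) :
    pvOuter nums s = 1 - pvMinPrefix nums := by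
  rw [pvOuter]
  by_cases h : pvCheck s nums = true
  · have := (pvCheck_iff nums s h1).mp h
    simp only [h, if_true]
    omega
  · have : ¬ (1 ≤ s + pvMinPrefix nums) := fun hc => h ((pvCheck_iff nums s h1).mpr hc)
    simp only [h]
    exact outer_eq nums (s + 1) (by omega) (by omega)
termination_by (1 - pvMinPrefix nums - s).toNat
decreasing_by
  have : ¬ (1 ≤ s + pvMinPrefix nums) := by
    intro hc
    exact h ((pvCheck_iff nums s h1).mpr (by omega))
  omega

-- ===== VERDICT (by name: the statement is the Claim_ definition above) =====
theorem minimum_start_value_spec : Claim_equal_minimum_start_value := by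
  intro nums _
  unfold Spec_minimum_start_value minimum_start_value
  rw [alt_eq]
  have := pvMinPrefix_nonpos nums
  exact outer_eq nums 1 (le_refl 1) (by omega)
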